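-- pv_equiv track=rewrite | github.com/castagnotto/pymor | dependencies.py | strip_markers
-- ===== SOURCE A (Python) =====
-- def strip_markers(name):
--     for m in ';<>=':
--         try:
--             i = name.index(m)
--             name = name[:i].strip()
--         except ValueError:
--             continue
--     return name
-- ===== SOURCE B (Python) =====
-- def strip_markers(name):
--     for i, c in enumerate(name):
--         if c in ';<>=':
--             return name[:i].strip()
--     return name
-- ===== Notes on version B (the rewrite author's own statement) =====
-- stated objective: simpler
-- what changed: A loops over the four marker characters, repeatedly truncating-and-stripping the string (each marker search scanning the previously cut result); B makes one left-to-right scan over the characters of the original string and cuts-and-strips once at the first marker character it meets (returning the name unchanged, unstripped, when no marker occurs).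
import Mathlib
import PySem

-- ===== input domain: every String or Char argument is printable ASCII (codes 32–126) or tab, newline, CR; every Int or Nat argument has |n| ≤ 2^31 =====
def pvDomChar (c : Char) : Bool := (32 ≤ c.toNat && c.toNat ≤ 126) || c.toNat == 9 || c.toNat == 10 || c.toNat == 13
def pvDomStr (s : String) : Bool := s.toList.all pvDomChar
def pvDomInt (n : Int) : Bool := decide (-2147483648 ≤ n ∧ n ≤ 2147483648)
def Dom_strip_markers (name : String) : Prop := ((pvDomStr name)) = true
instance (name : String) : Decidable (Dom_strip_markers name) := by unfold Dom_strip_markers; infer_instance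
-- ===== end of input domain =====

-- B replaces A's per-marker truncate-and-strip loop by a single left-to-right scan that
-- cuts once at the first marker character (objective: simpler).


-- ===== PORT A =====
-- one iteration of A's loop body: i = name.index(m); name = name[:i].strip()
-- (index? = none is the ValueError branch: 'continue')
def stripStep (s : List Char) (m : Char) : List Char :=
  match PySem.List.index? s m with
  | some i => PySem.Chars.strip (s.take i)
  | none => s

def strip_markers (name : String) : String :=
  String.mk ([';', '<', '>', '='].foldl stripStep name.toList)

-- ===== PORT B =====
-- B: for i, c in enumerate(name): if c in ';<>=': return name[:i].strip();  return name
def altGo (orig : List Char) : List Char → Nat → List Char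
  | [], _ => orig
  | c :: rest, i =>
    if c = ';' ∨ c = '<' ∨ c = '>' ∨ c = '=' then PySem.Chars.strip (orig.take i)
    else altGo orig rest (i + 1)

def strip_markers_alt (name : String) : String :=
  String.mk (altGo name.toList name.toList 0)

-- ===== PRECONDITION & SPEC =====
def Spec_strip_markers (name : String) (out : String) : Prop := out = strip_markers_alt name
instance (name : String) (out : String) : Decidable (Spec_strip_markers name out) := by unfold Spec_strip_markers; infer_instance

-- ===== CLAIM (what is proved, stated in full; the proofs are below) =====
def Claim_equal_strip_markers : Prop := ∀ (name : String), Dom_strip_markers name → Spec_strip_markers name (strip_markers name)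

-- ===== LEMMAS AND PROOFS =====

-- the common characterisation: cut-and-strip at the first char satisfying q, if any
def cutQ (q : Char → Bool) (s : List Char) : List Char :=
  if s.any q then PySem.Chars.strip (s.take (s.findIdx q)) else s

theorem findIdx_congr_mem {α : Type} {p q : α → Bool} :
    ∀ (l : List α), (∀ c ∈ l, p c = q c) → l.findIdx p = l.findIdx q := by
  intro l
  induction l with
  | nil => intro _; rfl
  | cons a l ih =>
    intro h
    simp only [List.findIdx_cons, h a (List.mem_cons_self), ih (fun c hc => h c (List.mem_cons_of_mem _ hc))]

theorem any_congr_mem {α : Type} {p q : α → Bool} :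
    ∀ (l : List α), (∀ c ∈ l, p c = q c) → l.any p = l.any q := by
  intro l
  induction l with
  | nil => intro _; rfl
  | cons a l ih =>
    intro h
    simp only [List.any_cons, h a (List.mem_cons_self), ih (fun c hc => h c (List.mem_cons_of_mem _ hc))]

theorem mem_strip {c : Char} {s : List Char} (h : c ∈ PySem.Chars.strip s) : c ∈ s := by
  unfold PySem.Chars.strip PySem.Chars.rstrip PySem.Chars.lstrip at h
  rw [List.mem_reverse] at h
  have h1 : c ∈ (List.dropWhile PySem.Chars.isspace s).reverse :=
    (List.dropWhile_sublist _).subset h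
  rw [List.mem_reverse] at h1
  exact (List.dropWhile_sublist _).subset h1

-- strip (w ++ x) = strip x when every char of w is whitespace
theorem strip_ws_prefix {w x : List Char} (hw : ∀ c ∈ w, PySem.Chars.isspace c = true) :
    PySem.Chars.strip (w ++ x) = PySem.Chars.strip x := by
  unfold PySem.Chars.strip PySem.Chars.lstrip
  rw [List.dropWhile_append]
  simp [List.dropWhile_eq_nil_iff.2 hw]

-- rstrip decomposition: u = rstrip u ++ v with v all whitespace
theorem rstrip_decomp (u : List Char) :
    u = PySem.Chars.rstrip u ++ (List.takeWhile PySem.Chars.isspace u.reverse).reverse ∧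
    (∀ c ∈ (List.takeWhile PySem.Chars.isspace u.reverse).reverse, PySem.Chars.isspace c = true) := by
  constructor
  · conv_lhs => rw [← u.reverse_reverse,
      ← List.takeWhile_append_dropWhile (p := PySem.Chars.isspace) (l := u.reverse),
      List.reverse_append]
    rfl
  · intro c hc
    rw [List.mem_reverse] at hc
    exact List.mem_takeWhile_imp hc

-- the composition lemma: one step of A followed by cutting on q equals cutting on (·== m || q ·)
theorem cut_step (m : Char) (q : Char → Bool) (s : List Char)
    (hm : PySem.Chars.isspace m = false)
    (hq : ∀ c, q c = true → PySem.Chars.isspace c = false) :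
    cutQ q (stripStep s m) = cutQ (fun c => c == m || q c) s := by
  rcases h : PySem.List.index? s m with _ | i
  · -- m ∉ s
    have hstep : stripStep s m = s := by unfold stripStep; rw [h]
    rw [PySem.List.index?_eq_none_iff] at h
    rw [hstep]
    unfold cutQ
    have hcong : ∀ c ∈ s, q c = (c == m || q c) := by
      intro c hc
      have : (c == m) = false := by
        simp only [beq_eq_false_iff_ne]; rintro rfl; exact h hc
      simp [this]
    rw [any_congr_mem s hcong, findIdx_congr_mem s hcong]
  · -- m ∈ s at first index i
    obtain ⟨hi, hsi, hbefore⟩ := PySem.List.getElem_of_index?_eq_some h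
    have hstep : stripStep s m = PySem.Chars.strip (s.take i) := by unfold stripStep; rw [h]
    rw [hstep]
    set t := s.take i with ht
    have htlen : t.length = i := by simp [ht]; omega
    have htget : ∀ j (hj : j < i), t[j]'(by omega) = s[j]'(by omega) := by
      intro j hj; simp [ht]
    by_cases hAnyT : t.any q
    case neg =>
      -- no q-char before i : combined cut is at i, result strip t; and strip t has no q-char
      have hfail : ∀ j (hj : j < i), (fun c => c == m || q c) (s[j]'(by omega)) = false := by
        intro j hj
        have h1 : (s[j]'(by omega)) ≠ m := hbefore j hj
        have h2 : q (s[j]'(by omega)) = false := by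
          have := List.any_eq_false.1 (by simpa using hAnyT) (t[j]'(by omega)) (List.getElem_mem _)
          rw [htget j hj] at this; simpa using this
        simp [h1, h2]
      have hfind : s.findIdx (fun c => c == m || q c) = i := by
        rw [List.findIdx_eq hi]
        refine ⟨by simp [hsi], fun j hj => by simpa using hfail j hj⟩
      have hany : s.any (fun c => c == m || q c) = true :=
        List.any_eq_true.2 ⟨m, by rw [← hsi]; exact List.getElem_mem _, by simp⟩
      unfold cutQ
      rw [hfind, hany, if_pos rfl]
      have hnoq : (PySem.Chars.strip t).any q = false := by
        apply List.any_eq_false.2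
        intro c hc
        have hct : c ∈ t := mem_strip hc
        obtain ⟨j, hj, rfl⟩ := List.mem_iff_getElem.1 hct
        have := List.any_eq_false.1 (by simpa using hAnyT) _ (List.getElem_mem hj)
        simpa using this
      rw [hnoq]
      simp [ht]
    case pos =>
      -- a q-char occurs in t at first index j < i
      have hjlt : t.findIdx q < t.length := List.findIdx_lt_length.2 (by simpa using hAnyT)
      set j := t.findIdx q with hjdef
      have hqj : q (t[j]'hjlt) = true := List.findIdx_getElem
      have hjfail : ∀ x (hx : x < j), q (t[x]'(by omega)) = false := by
        intro x hx
        simpa using List.not_of_lt_findIdx (p := q) (xs := t) (by omega)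
      have hji : j < i := by omega
      -- combined findIdx on s is j
      have hfind : s.findIdx (fun c => c == m || q c) = j := by
        rw [List.findIdx_eq (by omega)]
        constructor
        · rw [← htget j hji]; simp [hqj]
        · intro x hx
          have h1 : (s[x]'(by omega)) ≠ m := hbefore x (by omega)
          have h2 : q (s[x]'(by omega)) = false := by rw [← htget x (by omega)]; exact hjfail x hx
          simp [h1, h2]
      have hany : s.any (fun c => c == m || q c) = true :=
        List.any_eq_true.2 ⟨m, by rw [← hsi]; exact List.getElem_mem _, by simp⟩
      unfold cutQ
      rw [hfind, hany, if_pos rfl]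
      -- RHS = strip (take j s) = strip (take j t)
      have htj : s.take j = t.take j := by
        rw [ht, List.take_take]; congr 1; omega
      rw [htj]
      -- decompose t = w ++ u
      set w := List.takeWhile PySem.Chars.isspace t with hwdef
      set u := List.dropWhile PySem.Chars.isspace t with hudef
      have htwu : t = w ++ u := (List.takeWhile_append_dropWhile ..).symm
      have hwws : ∀ c ∈ w, PySem.Chars.isspace c = true := fun c hc => List.mem_takeWhile_imp hc
      have hwj : w.length ≤ j := by
        by_contra hlt
        push_neg at hlt
        have hget : t[j]'hjlt = w[j]'hlt := by
          rw [List.getElem_of_eq htwu]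
          exact List.getElem_append_left hlt
        have hwsj : PySem.Chars.isspace (t[j]'hjlt) = true := by
          rw [hget]; exact hwws _ (List.getElem_mem hlt)
        have hnws := hq _ hqj
        rw [hnws] at hwsj
        exact Bool.noConfusion hwsj
      -- strip t = rstrip u, and its q-structure
      have hstript : PySem.Chars.strip t = PySem.Chars.rstrip u := by
        unfold PySem.Chars.strip PySem.Chars.lstrip
        rw [← hudef]
      obtain ⟨hudec, hvws⟩ := rstrip_decomp u
      set r := PySem.Chars.rstrip u with hrdef
      have hulen : w.length + u.length = t.length := by
        rw [htwu]; simp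
      have hjw : j - w.length < u.length := by omega
      have huget : ∀ x (hx : x < u.length), u[x]'hx = t[x + w.length]'(by omega) := by
        intro x hx
        rw [List.getElem_of_eq htwu]
        rw [List.getElem_append_right (by omega)]
        congr 1; omega
      have hqu : q (u[j - w.length]'hjw) = true := by
        rw [huget _ hjw]
        have : j - w.length + w.length = j := by omega
        simp_rw [this]; exact hqj
      have hjr : j - w.length < r.length := by
        by_contra hge
        push_neg at hge
        have hmem : u[j - w.length]'hjw ∈ (List.takeWhile PySem.Chars.isspace u.reverse).reverse := by
          rw [List.getElem_of_eq hudec]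
          rw [List.getElem_append_right (by omega)]
          exact List.getElem_mem _
        exact absurd (hq _ hqu) (by simp [hvws _ hmem])
      have hrget : ∀ x (hx : x < r.length), r[x]'hx = u[x]'(by rw [hudec]; simp; omega) := by
        intro x hx
        conv_rhs => rw [List.getElem_of_eq hudec]
        exact (List.getElem_append_left hx).symm
      have hanyr : r.any q = true := by
        apply List.any_eq_true.2
        exact ⟨r[j - w.length]'hjr, List.getElem_mem _, by rw [hrget _ hjr]; exact hqu⟩
      have hfindr : r.findIdx q = j - w.length := by
        rw [List.findIdx_eq hjr]
        refine ⟨by rw [hrget _ hjr]; exact hqu, ?_⟩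
        intro x hx
        rw [hrget x (by omega)]
        have hxu : x < u.length := by rw [hudec]; simp; omega
        rw [huget x hxu]
        simpa using hjfail (x + w.length) (by omega)
      rw [hstript, hanyr, if_pos rfl, hfindr]
      have htakeru : r.take (j - w.length) = u.take (j - w.length) := by
        conv_rhs => rw [hudec]
        rw [List.take_append_of_le_length (by omega)]
      have htaket : t.take j = w ++ u.take (j - w.length) := by
        rw [htwu, List.take_append, List.take_of_length_le hwj]
      rw [htakeru, htaket, strip_ws_prefix hwws]

-- markers are non-whitespace
theorem marker_not_ws : ∀ c ∈ [';', '<', '>', '='], PySem.Chars.isspace c = false := by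
  intro c hc; fin_cases hc <;> rfl

-- A's fold over a marker list equals one combined cut
theorem foldA_eq_cut : ∀ (M : List Char) (s : List Char),
    (∀ c ∈ M, PySem.Chars.isspace c = false) →
    M.foldl stripStep s = cutQ (fun c => M.contains c) s := by
  intro M
  induction M with
  | nil =>
    intro s _
    simp [cutQ, List.foldl]
  | cons m M ih =>
    intro s hws
    rw [List.foldl_cons, ih _ (fun c hc => hws c (List.mem_cons_of_mem _ hc)),
      cut_step m _ s (hws m List.mem_cons_self)
        (fun c hc => hws c (List.mem_cons_of_mem _ (by simpa using hc)))]
    unfold cutQ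
    have : (fun c => c == m || M.contains c) = (fun c => (m :: M).contains c) := by
      funext c; simp [List.contains_cons, beq_eq_decide]
    rw [this]

-- B's scan equals the combined cut
theorem altGo_eq_cut (orig : List Char) : ∀ (l : List Char) (i : Nat),
    orig.drop i = l →
    (∀ j (hj : j < i) (hj2 : j < orig.length),
      ([';', '<', '>', '='].contains (orig[j]'hj2)) = false) →
    altGo orig l i = cutQ (fun c => [';', '<', '>', '='].contains c) orig := by
  intro l
  induction l with
  | nil =>
    intro i hdrop hfail
    have hlen : orig.length ≤ i := by
      by_contra hlt
      push_neg at hlt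
      have := List.drop_eq_nil_iff.1 hdrop
      omega
    have hany : orig.any (fun c => [';', '<', '>', '='].contains c) = false := by
      rw [List.any_eq_false]
      intro c hc
      obtain ⟨j, hj, rfl⟩ := List.mem_iff_getElem.1 hc
      simp only [hfail j (by omega) hj]
      simp
    unfold altGo cutQ
    rw [hany]
    simp
  | cons c rest ih =>
    intro i hdrop hfail
    have hi : i < orig.length := by
      by_contra hge
      push_neg at hge
      rw [List.drop_eq_nil_iff.2 hge] at hdrop
      exact absurd hdrop.symm (List.cons_ne_nil c rest)
    have hci : orig[i]'hi = c := by
      have h0 : (orig.drop i)[0]'(by rw [hdrop]; exact Nat.zero_lt_succ _) = c := by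
        simp [hdrop]
      rw [List.getElem_drop] at h0
      simpa using h0
    by_cases hc : c = ';' ∨ c = '<' ∨ c = '>' ∨ c = '='
    · rw [altGo, if_pos hc]
      have hcc : ([';', '<', '>', '='].contains c) = true := by
        rcases hc with rfl | rfl | rfl | rfl <;> rfl
      have hany : orig.any (fun c => [';', '<', '>', '='].contains c) = true :=
        List.any_eq_true.2 ⟨c, by rw [← hci]; exact List.getElem_mem _, hcc⟩
      have hfind : orig.findIdx (fun c => [';', '<', '>', '='].contains c) = i := by
        rw [List.findIdx_eq hi]
        exact ⟨by rw [hci]; exact hcc, fun j hj => by rw [hfail j hj (by omega)]⟩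
      unfold cutQ
      rw [hany, if_pos rfl, hfind]
    · rw [altGo, if_neg hc]
      apply ih (i + 1)
      · rw [← List.drop_drop, hdrop]; rfl
      · intro j hj hj2
        rcases Nat.lt_or_ge j i with h | h
        · exact hfail j h hj2
        · have : j = i := by omega
          subst this
          rw [hci]
          push_neg at hc
          obtain ⟨h1, h2, h3, h4⟩ := hc
          simp [List.contains_cons, h1, h2, h3, h4]

-- ===== VERDICT (by name: the statement is the Claim_ definition above) =====
theorem strip_markers_spec : Claim_equal_strip_markers := by
  intro name _
  unfold Spec_strip_markers strip_markers strip_markers_alt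
  rw [foldA_eq_cut [';', '<', '>', '='] name.toList marker_not_ws,
    altGo_eq_cut name.toList name.toList 0 (by simp) (fun j hj _ => absurd hj (by omega))]
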